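-- pv_equiv track=rewrite | github.com/frenchrevdata/ap | processing_functions.py | compute_difference_withplein
-- ===== SOURCE A (Python) =====
-- def compute_difference_withplein(dict1, dict2):
-- 	diff = {}
-- 	keys_seen = []
-- 	for k in dict1:
-- 		if k in dict2:
-- 			keys_seen.append(k)
-- 			diff[k] = dict1[k] - dict2[k]
-- 		else:
-- 			diff[k] = dict1[k]
-- 	for key in dict2:
-- 		if key not in keys_seen:
-- 			diff[key] = dict2[key]
-- 	return diff
-- ===== SOURCE B (Python) =====
-- def compute_difference_withplein(dict1, dict2):
-- 	merged = {**dict1, **dict2}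
-- 	return {k: dict1[k] - dict2[k] if k in dict1 and k in dict2 else v
-- 	        for k, v in merged.items()}
-- ===== Notes on version B (the rewrite author's own statement) =====
-- stated objective: simpler
-- what changed: Replaces A's two sequential loops with keys_seen bookkeeping by building the merged table {**dict1, **dict2} once and producing the result in a single uniform comprehension over it.
import Mathlib
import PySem

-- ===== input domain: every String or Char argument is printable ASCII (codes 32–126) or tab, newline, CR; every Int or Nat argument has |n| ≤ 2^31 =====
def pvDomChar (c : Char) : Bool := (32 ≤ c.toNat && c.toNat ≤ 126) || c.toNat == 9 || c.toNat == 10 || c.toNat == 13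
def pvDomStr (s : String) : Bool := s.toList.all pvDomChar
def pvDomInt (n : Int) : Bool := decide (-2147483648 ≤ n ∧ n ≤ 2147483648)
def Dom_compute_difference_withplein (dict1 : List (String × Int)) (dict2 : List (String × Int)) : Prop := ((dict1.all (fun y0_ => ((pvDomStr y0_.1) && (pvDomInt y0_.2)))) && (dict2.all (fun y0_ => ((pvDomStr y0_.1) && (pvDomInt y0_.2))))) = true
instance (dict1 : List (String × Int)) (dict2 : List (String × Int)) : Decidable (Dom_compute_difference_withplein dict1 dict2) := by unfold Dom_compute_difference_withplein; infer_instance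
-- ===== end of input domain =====

-- B builds the merged table {**dict1, **dict2} once and emits the result in one uniform
-- comprehension over it, replacing A's two sequential loops and keys_seen bookkeeping (objective: simpler).

-- ===== PORT A =====
def compute_difference_withplein (dict1 : List (String × Int)) (dict2 : List (String × Int)) : List (String × Int) :=
  let d1 := PySem.Dict.ofList dict1
  let d2 := PySem.Dict.ofList dict2
  -- diff = {}; keys_seen = []; for k in dict1: …
  let st := d1.keys.foldl
    (fun (p : PySem.Dict String Int × List String) k =>
      if d2.contains k then (p.1.insert k (d1.getD k 0 - d2.getD k 0), p.2 ++ [k])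
      else (p.1.insert k (d1.getD k 0), p.2))
    (PySem.Dict.empty, [])
  -- for key in dict2: if key not in keys_seen: diff[key] = dict2[key]
  let diff := d2.keys.foldl
    (fun diff key => if !(st.2.contains key) then diff.insert key (d2.getD key 0) else diff)
    st.1
  diff.items

-- ===== PORT B =====
def compute_difference_withplein_alt (dict1 : List (String × Int)) (dict2 : List (String × Int)) : List (String × Int) :=
  let d1 := PySem.Dict.ofList dict1
  let d2 := PySem.Dict.ofList dict2
  -- merged = {**dict1, **dict2}
  let merged := d1.update d2.items
  -- {k: dict1[k] - dict2[k] if k in dict1 and k in dict2 else v for k, v in merged.items()}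
  let res := merged.items.foldl
    (fun (r : PySem.Dict String Int) p =>
      r.insert p.1 (if d1.contains p.1 && d2.contains p.1 then d1.getD p.1 0 - d2.getD p.1 0 else p.2))
    PySem.Dict.empty
  res.items

-- ===== PRECONDITION & SPEC =====
def Spec_compute_difference_withplein (dict1 : List (String × Int)) (dict2 : List (String × Int)) (out : List (String × Int)) : Prop := out = compute_difference_withplein_alt dict1 dict2
instance (dict1 : List (String × Int)) (dict2 : List (String × Int)) (out : List (String × Int)) : Decidable (Spec_compute_difference_withplein dict1 dict2 out) := by unfold Spec_compute_difference_withplein; infer_instance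

-- ===== CLAIM (what is proved, stated in full; the proofs are below) =====
def Claim_equal_compute_difference_withplein : Prop := ∀ (dict1 : List (String × Int)) (dict2 : List (String × Int)), Dom_compute_difference_withplein dict1 dict2 → Spec_compute_difference_withplein dict1 dict2 (compute_difference_withplein dict1 dict2)

-- ===== LEMMAS AND PROOFS =====

-- A's first loop, carrying the pair (diff, keys_seen), splits into a plain insert fold and a filter.
theorem pvPairFold (c : String → Bool) (F G : String → Int) (l : List String)
    (d : PySem.Dict String Int) (s : List String) :
    l.foldl
      (fun (p : PySem.Dict String Int × List String) k =>
        if c k then (p.1.insert k (F k), p.2 ++ [k]) else (p.1.insert k (G k), p.2)) (d, s)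
    = (l.foldl (fun d k => d.insert k (if c k then F k else G k)) d, s ++ l.filter c) := by
  induction l generalizing d s with
  | nil => simp
  | cons k t ih =>
    by_cases hc : c k = true <;>
      simp [hc, ih]

-- A's second loop, a conditional insert, is an insert fold over the filtered key list.
theorem pvCondFold (c : String → Bool) (v : String → Int) (l : List String)
    (d : PySem.Dict String Int) :
    l.foldl (fun d k => if c k then d.insert k (v k) else d) d
    = (l.filter c).foldl (fun d k => d.insert k (v k)) d := by
  induction l generalizing d with
  | nil => rfl
  | cons k t ih =>
    by_cases hc : c k = true <;> simp [hc, ih]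

-- overwrite function used to characterise the items of d.update l
def pvOw (l : List (String × Int)) (q : String × Int) : String × Int :=
  match (PySem.Dict.mk l).get? q.1 with
  | some v => (q.1, v)
  | none => q

theorem pvUpdateItems (l : List (String × Int)) (d : PySem.Dict String Int)
    (hl : (l.map Prod.fst).Nodup) :
    (l.foldl (fun d p => d.insert p.1 p.2) d).items
      = d.items.map (pvOw l) ++ l.filter (fun p => !(d.contains p.1)) := by
  induction l generalizing d with
  | nil =>
    have h0 : ∀ q : String × Int, pvOw [] q = q := by
      intro q
      have : (PySem.Dict.mk ([] : List (String × Int))).get? q.1 = none := by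
        rw [PySem.Dict.get?_eq_none_iff_not_mem_keys]
        simp [PySem.Dict.keys]
      simp [pvOw, this]
    have hmap : List.map (pvOw []) d.items = List.map id d.items :=
      List.map_congr_left (fun q _ => h0 q)
    simp [hmap]
  | cons p t ih =>
    obtain ⟨a, b⟩ := p
    rw [List.map_cons] at hl
    have hl' := List.nodup_cons.mp hl
    have hpt : a ∉ t.map Prod.fst := hl'.1
    have hgt : (PySem.Dict.mk t).get? a = none := by
      rw [PySem.Dict.get?_eq_none_iff_not_mem_keys]
      simpa [PySem.Dict.keys] using hpt
    have howp : pvOw t (a, b) = (a, b) := by simp [pvOw, hgt]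
    have hcomp : ∀ q : String × Int, q.1 ≠ a → pvOw t q = pvOw ((a, b) :: t) q := by
      intro q hq
      have hne : (a == q.1) = false := by
        simp only [beq_eq_false_iff_ne, ne_eq]; exact fun h => hq h.symm
      simp only [pvOw]
      rw [PySem.Dict.get?_mk_cons, hne]
      simp
    by_cases hc : d.contains a = true
    · have hins := PySem.Dict.items_insert d a b
      rw [if_pos hc] at hins
      simp only [List.foldl_cons]
      rw [ih _ hl'.2, hins, List.map_map]
      have hseg1 : d.items.map (pvOw t ∘ fun p => if (p.1 == a) = true then (a, b) else p)
          = d.items.map (pvOw ((a, b) :: t)) := by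
        apply List.map_congr_left
        intro q _
        obtain ⟨qa, qb⟩ := q
        by_cases hq : qa = a
        · subst hq
          simp only [Function.comp]
          rw [if_pos (by simp)]
          rw [howp]
          simp only [pvOw]
          rw [PySem.Dict.get?_mk_cons]
          simp
        · simp only [Function.comp]
          rw [if_neg (by simp [hq])]
          exact hcomp (qa, qb) hq
      have hseg2 : (t.filter (fun q => !((d.insert a b).contains q.1)))
          = ((a, b) :: t).filter (fun p => !(d.contains p.1)) := by
        rw [List.filter_cons]
        simp only [hc, Bool.not_true]
        rw [if_neg (by simp)]
        apply List.filter_congr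
        intro q hqmem
        have hq : q.1 ≠ a := by
          intro h; exact hpt (h ▸ List.mem_map_of_mem hqmem)
        simp [PySem.Dict.contains_insert, hq]
      rw [hseg1, hseg2]
    · have hins := PySem.Dict.items_insert d a b
      rw [if_neg hc] at hins
      simp only [List.foldl_cons]
      rw [ih _ hl'.2, hins, List.map_append]
      have hseg1 : d.items.map (pvOw t) = d.items.map (pvOw ((a, b) :: t)) := by
        apply List.map_congr_left
        intro q hqmem
        have hq : q.1 ≠ a := by
          intro h
          apply hc
          rw [PySem.Dict.contains_iff_mem_keys]
          have : a ∈ d.items.map Prod.fst := h ▸ List.mem_map_of_mem hqmem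
          simpa [PySem.Dict.keys, List.mem_map] using this
        exact hcomp q hq
      have hseg2 : (t.filter (fun q => !((d.insert a b).contains q.1)))
          = t.filter (fun p => !(d.contains p.1)) := by
        apply List.filter_congr
        intro q hqmem
        have hq : q.1 ≠ a := by
          intro h; exact hpt (h ▸ List.mem_map_of_mem hqmem)
        simp [PySem.Dict.contains_insert, hq]
      rw [List.filter_cons]
      simp only [hc, Bool.not_false]
      rw [if_pos (by simp [Bool.not_eq_true] at hc ⊢)]
      rw [hseg1, hseg2, List.map_cons, List.map_nil, howp, List.append_assoc]
      rfl

-- common canonical form both ports are reduced to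
def pvCanon (d1 d2 : PySem.Dict String Int) : List (String × Int) :=
  d1.keys.map (fun k => (k, if d2.contains k then d1.getD k 0 - d2.getD k 0 else d1.getD k 0))
  ++ (d2.keys.filter (fun k => !(d1.contains k))).map (fun k => (k, d2.getD k 0))

theorem pvA_eq (dict1 dict2 : List (String × Int)) :
    compute_difference_withplein dict1 dict2
      = pvCanon (PySem.Dict.ofList dict1) (PySem.Dict.ofList dict2) := by
  have hn1 : (PySem.Dict.ofList dict1).keys.Nodup := PySem.Dict.nodup_keys_ofList dict1
  have hn2 : (PySem.Dict.ofList dict2).keys.Nodup := PySem.Dict.nodup_keys_ofList dict2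
  simp only [compute_difference_withplein]
  generalize (PySem.Dict.ofList dict1) = d1 at *
  generalize (PySem.Dict.ofList dict2) = d2 at *
  rw [pvPairFold (fun k => d2.contains k)
      (fun k => d1.getD k 0 - d2.getD k 0) (fun k => d1.getD k 0) d1.keys PySem.Dict.empty []]
  rw [pvCondFold]
  dsimp only
  simp only [List.nil_append]
  have hfresh1 : ∀ a ∈ d1.keys, (PySem.Dict.empty : PySem.Dict String Int).contains a = false := by
    intro a _; simp [PySem.Dict.contains, PySem.Dict.empty]
  have hD := PySem.Dict.items_foldl_insert_fresh d1.keys (fun k => k)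
      (fun k => if d2.contains k then d1.getD k 0 - d2.getD k 0 else d1.getD k 0)
      PySem.Dict.empty hfresh1 (by simpa using hn1)
  -- the dict built by the first loop
  set D := d1.keys.foldl (fun d k =>
      d.insert k (if d2.contains k then d1.getD k 0 - d2.getD k 0 else d1.getD k 0))
      PySem.Dict.empty with hDdef
  have hDitems : D.items
      = d1.keys.map (fun k =>
          (k, if d2.contains k then d1.getD k 0 - d2.getD k 0 else d1.getD k 0)) := by
    simpa [PySem.Dict.empty] using hD
  have hDkeys : D.keys = d1.keys := by
    simp [PySem.Dict.keys, hDitems]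
  -- the filtered second-loop key list
  have hfilt : (d2.keys.filter fun key => !((d1.keys.filter fun k => d2.contains k).contains key))
      = d2.keys.filter (fun k => !(d1.contains k)) := by
    apply List.filter_congr
    intro k hk
    have h2 : d2.contains k = true := (PySem.Dict.contains_iff_mem_keys d2 k).mpr hk
    by_cases h1 : d1.contains k = true
    · have hk1 : k ∈ d1.keys := (PySem.Dict.contains_iff_mem_keys d1 k).mp h1
      simp [h1, List.mem_filter, hk1, h2]
    · have hk1 : k ∉ d1.keys := fun hmem =>
        h1 ((PySem.Dict.contains_iff_mem_keys d1 k).mpr hmem)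
      simp [h1, List.mem_filter, hk1]
  rw [hfilt]
  have hfresh2 : ∀ a ∈ d2.keys.filter (fun k => !(d1.contains k)), D.contains a = false := by
    intro a ha
    have := (List.mem_filter.mp ha).2
    have ha1 : d1.contains a = false := by simpa using this
    rw [← Bool.not_eq_true]
    intro hcon
    have : a ∈ D.keys := (PySem.Dict.contains_iff_mem_keys D a).mp hcon
    rw [hDkeys] at this
    exact absurd ((PySem.Dict.contains_iff_mem_keys d1 a).mpr this) (by simp [ha1])
  have hE := PySem.Dict.items_foldl_insert_fresh (d2.keys.filter (fun k => !(d1.contains k)))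
      (fun k => k) (fun key => d2.getD key 0) D hfresh2
      (by simpa using hn2.filter _)
  simp only [] at hE
  rw [hE, hDitems]
  rfl

theorem pvB_eq (dict1 dict2 : List (String × Int)) :
    compute_difference_withplein_alt dict1 dict2
      = pvCanon (PySem.Dict.ofList dict1) (PySem.Dict.ofList dict2) := by
  have hn1 : (PySem.Dict.ofList dict1).keys.Nodup := PySem.Dict.nodup_keys_ofList dict1
  have hn2 : (PySem.Dict.ofList dict2).keys.Nodup := PySem.Dict.nodup_keys_ofList dict2
  simp only [compute_difference_withplein_alt]
  generalize (PySem.Dict.ofList dict1) = d1 at *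
  generalize (PySem.Dict.ofList dict2) = d2 at *
  have hnm : (d1.update d2.items).keys.Nodup := PySem.Dict.nodup_keys_update _ _ hn1
  have hMitems : (d1.update d2.items).items
      = d1.items.map (pvOw d2.items) ++ d2.items.filter (fun p => !(d1.contains p.1)) := by
    simp only [PySem.Dict.update]
    exact pvUpdateItems d2.items d1 (by simpa [PySem.Dict.keys] using hn2)
  have hfresh : ∀ a ∈ (d1.update d2.items).items,
      (PySem.Dict.empty : PySem.Dict String Int).contains a.1 = false := by
    intro a _; simp [PySem.Dict.contains, PySem.Dict.empty]
  have hres := PySem.Dict.items_foldl_insert_fresh (d1.update d2.items).items Prod.fst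
      (fun p => if d1.contains p.1 && d2.contains p.1 then d1.getD p.1 0 - d2.getD p.1 0 else p.2)
      PySem.Dict.empty hfresh (by simpa [PySem.Dict.keys] using hnm)
  rw [hres]
  simp only [PySem.Dict.empty, List.nil_append]
  rw [hMitems, List.map_append]
  have hseg1 : (d1.items.map (pvOw d2.items)).map
        (fun p => (p.1, if d1.contains p.1 && d2.contains p.1 then d1.getD p.1 0 - d2.getD p.1 0 else p.2))
      = d1.keys.map (fun k => (k, if d2.contains k then d1.getD k 0 - d2.getD k 0 else d1.getD k 0)) := by
    rw [List.map_map]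
    rw [PySem.Dict.items_eq_map_keys d1 hn1 0, List.map_map]
    apply List.map_congr_left
    intro k hk
    have h1 : d1.contains k = true := (PySem.Dict.contains_iff_mem_keys d1 k).mpr hk
    have hmk : PySem.Dict.mk d2.items = d2 := rfl
    by_cases h2 : d2.contains k = true
    · obtain ⟨v, hv⟩ : ∃ v, d2.get? k = some v := by
        rw [PySem.Dict.contains_eq_isSome_get?] at h2
        exact Option.isSome_iff_exists.mp h2
      have hgd : d2.getD k 0 = v := PySem.Dict.getD_of_get?_eq_some d2 0 hv
      have hgd1 : d1.getD k 0 = d1.getD k 0 := rfl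
      simp only [Function.comp, pvOw, hmk, hv, h1, h2, hgd]
      simp
    · have hv : d2.get? k = none := by
        rw [PySem.Dict.contains_eq_isSome_get?] at h2
        simpa using h2
      simp only [Function.comp, pvOw, hmk, hv]
      simp [h1, h2]
  have hseg2 : (d2.items.filter (fun p => !(d1.contains p.1))).map
        (fun p => (p.1, if d1.contains p.1 && d2.contains p.1 then d1.getD p.1 0 - d2.getD p.1 0 else p.2))
      = (d2.keys.filter (fun k => !(d1.contains k))).map (fun k => (k, d2.getD k 0)) := by
    have hid : ∀ p ∈ d2.items.filter (fun p => !(d1.contains p.1)),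
        ((fun p => (p.1, if d1.contains p.1 && d2.contains p.1 then d1.getD p.1 0 - d2.getD p.1 0 else p.2)) p) = p := by
      intro p hp
      have h1 : d1.contains p.1 = false := by simpa using (List.mem_filter.mp hp).2
      simp [h1]
    rw [List.map_congr_left hid]
    simp only [List.map_id_fun', id]
    rw [PySem.Dict.items_eq_map_keys d2 hn2 0, List.filter_map]
    rfl
  rw [hseg1, hseg2]
  rfl

-- ===== VERDICT (by name: the statement is the Claim_ definition above) =====
theorem compute_difference_withplein_spec : Claim_equal_compute_difference_withplein := by
  intro dict1 dict2 _
  unfold Spec_compute_difference_withplein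
  rw [pvA_eq, pvB_eq]
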